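-- pv_equiv track=rewrite | github.com/JustyDev/University | Semester-5/Лингвистическое обеспечение (16)/Labs/Lab5/code.py | replace_identifiers
-- ===== SOURCE A (Python) =====
-- def replace_identifiers(code: str, mapping: dict) -> str:
--     if not mapping:
--         return code
--     i, n = 0, len(code)
--     out = []
--     def peek(k=0):
--         j = i + k
--         return code[j] if j < n else ""
--     while i < n:
--         c = code[i]
--         # line comment
--         if c == "/" and peek(1) == "/":
--             j = i + 2
--             while j < n and code[j] != "\n":
--                 j += 1
--             out.append(code[i:j]); i = j
--             continue
--         # block comment
--         if c == "/" and peek(1) == "*":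
--             j = i + 2
--             while j < n-1 and not (code[j] == "*" and code[j+1] == "/"):
--                 j += 1
--             j = min(n, j+2)
--             out.append(code[i:j]); i = j
--             continue
--         # raw strings
--         if c in "uUL" and i+1 < n:
--             if code[i:i+3] == "u8R" and i+3<n and code[i+3] == '"':
--                 # handle as R""
--                 # emit as-is
--                 out.append(code[i:i+3]); i += 3; c = code[i]
--             elif code[i:i+2] in ("uR","UR","LR") and i+2<n and code[i+2] == '"':
--                 out.append(code[i:i+2]); i += 2; c = code[i]
--         if code[i:i+2] == 'R"':
--             # read delimiter up to '('
--             a = i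
--             i += 2
--             while i < n and code[i] != "(":
--                 i += 1
--             if i >= n:
--                 out.append(code[a:]); i = n; break
--             i += 1
--             # build endseq
--             j = a+2
--             delim = []
--             while j < n and code[j] != "(":
--                 delim.append(code[j]); j += 1
--             endseq = ")" + "".join(delim) + '"'
--             # scan to end
--             k = i
--             while k < n and code[k:k+len(endseq)] != endseq:
--                 k += 1
--             if k < n:
--                 k += len(endseq)
--                 out.append(code[a:k]); i = k
--                 continue
--             else:
--                 out.append(code[a:]); i = n; break
--         # normal strings and chars
--         if c in ('"', "'"):
--             q = c
--             j = i + 1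
--             esc = False
--             while j < n:
--                 ch = code[j]; j += 1
--                 if esc:
--                     esc = False
--                     continue
--                 if ch == "\\":
--                     esc = True
--                     continue
--                 if ch == q:
--                     break
--             out.append(code[i:j]); i = j
--             continue
--         # identifier
--         if (c.isalpha() or c == "_"):
--             j = i + 1
--             while j < n and (code[j].isalnum() or code[j] == "_"):
--                 j += 1
--             ident = code[i:j]
--             if ident in mapping:
--                 out.append(mapping[ident])
--             else:
--                 out.append(ident)
--             i = j
--             continue
--         # other
--         out.append(c); i += 1
--     return "".join(out)
-- ===== SOURCE B (Python) =====
-- # B: explicit finite-state machine — one forward char-at-a-time pass with a state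
-- # variable (no indices, no slicing, no lookahead), instead of A's index-based
-- # scanner with nested inner loops; only identifier runs are buffered.
--
-- def replace_identifiers(code: str, mapping: dict) -> str:
--     if not mapping:
--         return code
--     out = []
--     SPECIAL = ("R", "u8R", "uR", "UR", "LR")
--     st = ("N",)
--
--     def normal(c):
--         if c == "/":
--             return ("S",)
--         if c == '"' or c == "'":
--             out.append(c)
--             return ("Q", c, False)
--         if c.isalpha() or c == "_":
--             return ("I", [c])
--         out.append(c)
--         return ("N",)
--
--     for c in code:
--         tag = st[0]
--         if tag == "N":
--             st = normal(c)
--         elif tag == "S":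
--             if c == "/":
--                 out.append("//"); st = ("L",)
--             elif c == "*":
--                 out.append("/*"); st = ("B",)
--             else:
--                 out.append("/"); st = normal(c)
--         elif tag == "L":
--             out.append(c)
--             if c == "\n":
--                 st = ("N",)
--         elif tag == "B":
--             out.append(c)
--             if c == "*":
--                 st = ("BS",)
--         elif tag == "BS":
--             out.append(c)
--             if c == "/":
--                 st = ("N",)
--             elif c != "*":
--                 st = ("B",)
--         elif tag == "Q":
--             q, esc = st[1], st[2]
--             out.append(c)
--             if esc:
--                 st = ("Q", q, False)
--             elif c == "\\":
--                 st = ("Q", q, True)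
--             elif c == q:
--                 st = ("N",)
--         elif tag == "I":
--             if c.isalnum() or c == "_":
--                 st[1].append(c)
--             else:
--                 buf = "".join(st[1])
--                 if c == '"' and buf in SPECIAL:
--                     out.append(buf)
--                     out.append(c)
--                     st = ("RD", []) if buf == "R" else ("Q", '"', False)
--                 else:
--                     out.append(mapping.get(buf, buf))
--                     st = normal(c)
--         elif tag == "RD":
--             out.append(c)
--             if c == "(":
--                 st = ("RB", ")" + "".join(st[1]) + '"', "")
--             else:
--                 st[1].append(c)
--         else:  # RB
--             endseq = st[1]
--             out.append(c)
--             recent = (st[2] + c)[-len(endseq):]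
--             st = ("N",) if recent == endseq else ("RB", endseq, recent)
--
--     if st[0] == "S":
--         out.append("/")
--     elif st[0] == "I":
--         buf = "".join(st[1])
--         out.append(mapping.get(buf, buf))
--     return "".join(out)
-- ===== Notes on version B (the rewrite author's own statement) =====
-- stated objective: alternative
-- what changed: A's index-based scanner (nested inner scanning loops, peek() lookahead and slice emission) is replaced by an explicit finite-state machine: one forward char-at-a-time pass over the string with a state variable (normal/slash/line-comment/block-comment/string/identifier/raw-delimiter/raw-body states), no indices, no slices and no lookahead, buffering only identifier runs and matching the raw-string closing delimiter with a rolling last-k-characters buffer.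
import Mathlib
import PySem

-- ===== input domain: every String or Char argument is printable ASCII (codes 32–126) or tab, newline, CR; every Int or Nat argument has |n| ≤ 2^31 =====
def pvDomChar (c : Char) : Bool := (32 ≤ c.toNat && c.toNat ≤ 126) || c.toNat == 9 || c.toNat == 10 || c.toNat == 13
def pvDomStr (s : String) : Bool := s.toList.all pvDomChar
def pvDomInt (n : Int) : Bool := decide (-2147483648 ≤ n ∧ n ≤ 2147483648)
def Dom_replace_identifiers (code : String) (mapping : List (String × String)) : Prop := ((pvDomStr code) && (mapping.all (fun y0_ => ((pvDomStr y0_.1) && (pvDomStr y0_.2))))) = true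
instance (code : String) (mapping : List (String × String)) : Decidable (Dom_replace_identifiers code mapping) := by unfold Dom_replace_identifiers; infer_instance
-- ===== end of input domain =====

set_option maxRecDepth 8000
set_option maxHeartbeats 1000000


-- B replaces A's index-based scanner (nested inner scanning loops, peek() lookahead,
-- slice emission) by an explicit finite-state machine consuming one character at a
-- time with a state value and no lookahead; return values proved equal on all inputs
-- (neither program mutates its arguments).

-- ===== PORT A =====
-- A works on code.toList; both ports convert the mapping to List Char keys/values
-- once at entry (String.toList is injective, so lookups are unchanged).

-- peek(k): code[i+k] if in range else "" (empty string rendered as none)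
def pvPeekA (s : List Char) (n i k : Nat) : Option Char :=
  if i + k < n then some (s.getD (i + k) ' ') else none

-- while j < n and code[j] != "\n": j += 1
def pvScanLineA (s : List Char) (n j : Nat) : Nat :=
  if h : j < n ∧ s.getD j ' ' ≠ '\n' then pvScanLineA s n (j + 1) else j
  termination_by n - j
  decreasing_by omega

-- while j < n-1 and not (code[j] == "*" and code[j+1] == "/"): j += 1
def pvScanBlockA (s : List Char) (n j : Nat) : Nat :=
  if h : j < n - 1 ∧ ¬(s.getD j ' ' = '*' ∧ s.getD (j + 1) ' ' = '/') then
    pvScanBlockA s n (j + 1)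
  else j
  termination_by n - j
  decreasing_by omega

-- while i < n and code[i] != "(": i += 1
def pvScanToParenA (s : List Char) (n j : Nat) : Nat :=
  if h : j < n ∧ s.getD j ' ' ≠ '(' then pvScanToParenA s n (j + 1) else j
  termination_by n - j
  decreasing_by omega

-- while j < n and code[j] != "(": delim.append(code[j]); j += 1
def pvBuildDelimA (s : List Char) (n j : Nat) (acc : List Char) : List Char :=
  if h : j < n ∧ s.getD j ' ' ≠ '(' then pvBuildDelimA s n (j + 1) (acc ++ [s.getD j ' ']) else acc
  termination_by n - j
  decreasing_by omega

-- while k < n and code[k:k+len(endseq)] != endseq: k += 1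
def pvScanEndA (s : List Char) (n : Nat) (endseq : List Char) (k : Nat) : Nat :=
  if h : k < n ∧ (s.drop k).take endseq.length ≠ endseq then pvScanEndA s n endseq (k + 1) else k
  termination_by n - k
  decreasing_by omega

-- the string/char scanning loop with its esc flag (break returns j after the j += 1)
def pvScanStrA (s : List Char) (n : Nat) (q : Char) (j : Nat) (esc : Bool) : Nat :=
  if h : j < n then
    let ch := s.getD j ' '
    if esc then pvScanStrA s n q (j + 1) false
    else if ch = '\\' then pvScanStrA s n q (j + 1) true
    else if ch = q then j + 1
    else pvScanStrA s n q (j + 1) false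
  else j
  termination_by n - j
  decreasing_by all_goals omega

-- while j < n and (code[j].isalnum() or code[j] == "_"): j += 1
def pvScanIdentA (s : List Char) (n j : Nat) : Nat :=
  if h : j < n ∧ (PySem.Chars.isalnum (s.getD j ' ') = true ∨ s.getD j ' ' = '_') then
    pvScanIdentA s n (j + 1)
  else j
  termination_by n - j
  decreasing_by omega

-- the main `while i < n` loop; fuel counts iterations (i strictly increases, so
-- n + 1 iterations always suffice); `break` is rendered as continuing at i = n,
-- which ends the loop identically.
def pvLoopA (s : List Char) (m : PySem.Dict (List Char) (List Char)) (n : Nat) :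
    Nat → Nat → List (List Char) → List (List Char)
  | 0, _, out => out
  | fuel + 1, i, out =>
    if i < n then
      let c := s.getD i ' '
      if c = '/' ∧ pvPeekA s n i 1 = some '/' then
        let j := pvScanLineA s n (i + 2)
        pvLoopA s m n fuel j (out ++ [(s.drop i).take (j - i)])
      else if c = '/' ∧ pvPeekA s n i 1 = some '*' then
        let j0 := pvScanBlockA s n (i + 2)
        let j := min n (j0 + 2)
        pvLoopA s m n fuel j (out ++ [(s.drop i).take (j - i)])
      else
        -- raw-string prefixes: emit the prefix and fall through with i advanced
        let p :=
          if (c = 'u' ∨ c = 'U' ∨ c = 'L') ∧ i + 1 < n then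
            if (s.drop i).take 3 = ['u', '8', 'R'] ∧ i + 3 < n ∧ s.getD (i + 3) ' ' = '"' then
              (out ++ [(s.drop i).take 3], i + 3)
            else if ((s.drop i).take 2 = ['u', 'R'] ∨ (s.drop i).take 2 = ['U', 'R'] ∨
                     (s.drop i).take 2 = ['L', 'R']) ∧ i + 2 < n ∧ s.getD (i + 2) ' ' = '"' then
              (out ++ [(s.drop i).take 2], i + 2)
            else (out, i)
          else (out, i)
        let out1 := p.1
        let i1 := p.2
        let c1 := s.getD i1 ' '   -- c = code[i] re-read after the prefix
        if (s.drop i1).take 2 = ['R', '"'] then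
          let a := i1
          let i2 := pvScanToParenA s n (a + 2)
          if i2 ≥ n then pvLoopA s m n fuel n (out1 ++ [s.drop a])
          else
            let i3 := i2 + 1
            let delim := pvBuildDelimA s n (a + 2) []
            let endseq := ')' :: (delim ++ ['"'])
            let k := pvScanEndA s n endseq i3
            if k < n then
              let k2 := k + endseq.length
              pvLoopA s m n fuel k2 (out1 ++ [(s.drop a).take (k2 - a)])
            else pvLoopA s m n fuel n (out1 ++ [s.drop a])
        else if c1 = '"' ∨ c1 = '\'' then
          let j := pvScanStrA s n c1 (i1 + 1) false
          pvLoopA s m n fuel j (out1 ++ [(s.drop i1).take (j - i1)])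
        else if PySem.Chars.isalpha c1 = true ∨ c1 = '_' then
          let j := pvScanIdentA s n (i1 + 1)
          let ident := (s.drop i1).take (j - i1)
          let piece := match m.get? ident with
            | some v => v
            | none => ident
          pvLoopA s m n fuel j (out1 ++ [piece])
        else pvLoopA s m n fuel (i1 + 1) (out1 ++ [[c1]])
    else out

def replace_identifiers (code : String) (mapping : List (String × String)) : String :=
  if mapping = [] then code
  else
    let s := code.toList
    let n := s.length
    let m := PySem.Dict.mk (mapping.map (fun p => (p.1.toList, p.2.toList)))
    String.mk (pvLoopA s m n (n + 1) 0 []).flatten   -- "".join(out)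

-- ===== PORT B =====
-- Source B's explicit finite-state machine: the state value (Python tuples like
-- ("Q", q, esc)) becomes an inductive type; the for-loop over the characters is
-- pvRunB; the post-loop flush is pvFinB.

inductive PvSt where
  | N : PvSt                         -- ("N",)
  | S : PvSt                         -- ("S",)  pending '/'
  | L : PvSt                         -- ("L",)  line comment
  | B : PvSt                         -- ("B",)  block comment
  | BS : PvSt                        -- ("BS",) block comment, after '*'
  | Q : Char → Bool → PvSt           -- ("Q", quote, esc)
  | I : List Char → PvSt             -- ("I", buf)
  | RD : List Char → PvSt            -- ("RD", delim)
  | RB : List Char → List Char → PvSt -- ("RB", endseq, recent)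
deriving DecidableEq, Repr

-- (s + c)[-k:] : keep the last k characters
def pvKeepLast (k : Nat) (l : List Char) : List Char := l.drop (l.length - k)

def pvSpecialB (buf : List Char) : Bool :=
  buf = ['R'] || buf = ['u', '8', 'R'] || buf = ['u', 'R'] || buf = ['U', 'R'] || buf = ['L', 'R']

-- the nested helper normal(c); the emitted text goes in the second component
def pvNormalB (c : Char) : PvSt × List Char :=
  if c = '/' then (PvSt.S, [])
  else if c = '"' ∨ c = '\'' then (PvSt.Q c false, [c])
  else if PySem.Chars.isalpha c = true ∨ c = '_' then (PvSt.I [c], [])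
  else (PvSt.N, [c])

def pvStepB (m : PySem.Dict (List Char) (List Char)) (st : PvSt) (c : Char) : PvSt × List Char :=
  match st with
  | PvSt.N => pvNormalB c
  | PvSt.S =>
      if c = '/' then (PvSt.L, ['/', '/'])
      else if c = '*' then (PvSt.B, ['/', '*'])
      else ((pvNormalB c).1, '/' :: (pvNormalB c).2)
  | PvSt.L => if c = '\n' then (PvSt.N, [c]) else (PvSt.L, [c])
  | PvSt.B => if c = '*' then (PvSt.BS, [c]) else (PvSt.B, [c])
  | PvSt.BS =>
      if c = '/' then (PvSt.N, [c])
      else if c = '*' then (PvSt.BS, [c])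
      else (PvSt.B, [c])
  | PvSt.Q q esc =>
      if esc then (PvSt.Q q false, [c])
      else if c = '\\' then (PvSt.Q q true, [c])
      else if c = q then (PvSt.N, [c])
      else (PvSt.Q q false, [c])
  | PvSt.I buf =>
      if PySem.Chars.isalnum c = true ∨ c = '_' then (PvSt.I (buf ++ [c]), [])
      else if c = '"' ∧ pvSpecialB buf = true then
        if buf = ['R'] then (PvSt.RD [], buf ++ [c])
        else (PvSt.Q '"' false, buf ++ [c])
      else ((pvNormalB c).1, m.getD buf buf ++ (pvNormalB c).2)
  | PvSt.RD delim =>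
      if c = '(' then (PvSt.RB (')' :: (delim ++ ['"'])) [], [c])
      else (PvSt.RD (delim ++ [c]), [c])
  | PvSt.RB endseq recent =>
      let r := pvKeepLast endseq.length (recent ++ [c])
      if r = endseq then (PvSt.N, [c]) else (PvSt.RB endseq r, [c])

-- the flush after the for-loop
def pvFinB (m : PySem.Dict (List Char) (List Char)) : PvSt → List Char
  | PvSt.S => ['/']
  | PvSt.I buf => m.getD buf buf
  | _ => []

-- for c in code: … ; then the flush; emitted pieces are concatenated as produced
def pvRunB (m : PySem.Dict (List Char) (List Char)) : List Char → PvSt → List Char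
  | [], st => pvFinB m st
  | c :: cs, st => (pvStepB m st c).2 ++ pvRunB m cs (pvStepB m st c).1

def replace_identifiers_alt (code : String) (mapping : List (String × String)) : String :=
  if mapping = [] then code
  else
    let m := PySem.Dict.mk (mapping.map (fun p => (p.1.toList, p.2.toList)))
    String.mk (pvRunB m code.toList PvSt.N)   -- "".join(out)

-- ===== PRECONDITION & SPEC =====
def Spec_replace_identifiers (code : String) (mapping : List (String × String)) (out : String) : Prop := out = replace_identifiers_alt code mapping
instance (code : String) (mapping : List (String × String)) (out : String) : Decidable (Spec_replace_identifiers code mapping out) := by unfold Spec_replace_identifiers; infer_instance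

-- ===== CLAIM (what is proved, stated in full; the proofs are below) =====
def Claim_equal_replace_identifiers : Prop := ∀ (code : String) (mapping : List (String × String)), Dom_replace_identifiers code mapping → Spec_replace_identifiers code mapping (replace_identifiers code mapping)

-- ===== LEMMAS AND PROOFS =====

-- ---- small bridges between getElem?, getD and take/drop patterns ----

theorem pvGetD_eq_some {s : List Char} {k : Nat} (h : k < s.length) :
    s[k]? = some (s.getD k ' ') := by
  simp [List.getD_eq_getElem?_getD, List.getElem?_eq_getElem h]

theorem pvGetD_of_some {s : List Char} {k : Nat} {a : Char} (h : s[k]? = some a) :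
    k < s.length ∧ s.getD k ' ' = a := by
  obtain ⟨hk, hv⟩ := List.getElem?_eq_some_iff.mp h
  exact ⟨hk, by simp [List.getD_eq_getElem?_getD, List.getElem?_eq_getElem hk, hv]⟩

theorem pvTakeOne_iff (l : List Char) (a : Char) :
    l.take 1 = [a] ↔ l[0]? = some a := by
  cases l <;> simp

theorem pvTakeTwo_iff (l : List Char) (a b : Char) :
    l.take 2 = [a, b] ↔ l[0]? = some a ∧ l[1]? = some b := by
  match l with
  | [] => simp
  | [x] => simp
  | x :: y :: t => simp

theorem pvTakeThree_iff (l : List Char) (a b c : Char) :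
    l.take 3 = [a, b, c] ↔ l[0]? = some a ∧ l[1]? = some b ∧ l[2]? = some c := by
  match l with
  | [] => simp
  | [x] => simp
  | [x, y] => simp
  | x :: y :: z :: t => simp

theorem pvDrop_cons {s : List Char} {i : Nat} {a : Char} (h : s[i]? = some a) :
    s.drop i = a :: s.drop (i + 1) := by
  obtain ⟨hi, hv⟩ := List.getElem?_eq_some_iff.mp h
  rw [List.drop_eq_getElem_cons hi, hv]

theorem pvDropTake2 (s : List Char) (i : Nat) (a b : Char) :
    (s.drop i).take 2 = [a, b] ↔ s[i]? = some a ∧ s[i + 1]? = some b := by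
  rw [pvTakeTwo_iff]
  simp [List.getElem?_drop]

theorem pvDropTake3 (s : List Char) (i : Nat) (a b c : Char) :
    (s.drop i).take 3 = [a, b, c] ↔ s[i]? = some a ∧ s[i + 1]? = some b ∧ s[i + 2]? = some c := by
  rw [pvTakeThree_iff]
  simp [List.getElem?_drop]

theorem pvPeek_some_iff (s : List Char) (n i k : Nat) (c : Char) :
    pvPeekA s n i k = some c ↔ i + k < n ∧ s.getD (i + k) ' ' = c := by
  unfold pvPeekA
  split <;> simp_all

theorem pvTakeCons (s : List Char) (k j : Nat) (hk : k < s.length) (hj : k + 1 ≤ j) :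
    (s.drop k).take (j - k) = s.getD k ' ' :: (s.drop (k + 1)).take (j - (k + 1)) := by
  rw [pvDrop_cons (pvGetD_eq_some hk)]
  have h : j - k = (j - (k + 1)) + 1 := by omega
  rw [h, List.take_succ_cons]

theorem pvWindow_append (s : List Char) (a b c : Nat) (hab : a ≤ b) (hbc : b ≤ c) :
    (s.drop a).take (b - a) ++ (s.drop b).take (c - b) = (s.drop a).take (c - a) := by
  have h : c - a = (b - a) + (c - b) := by omega
  rw [h, List.take_add, List.drop_drop]
  have h2 : a + (b - a) = b := by omega
  rw [h2]

theorem pvSplitDrop (s : List Char) (a b : Nat) (h : a ≤ b) :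
    s.drop a = (s.drop a).take (b - a) ++ s.drop b := by
  conv_lhs => rw [← List.take_append_drop (b - a) (s.drop a)]
  rw [List.drop_drop, show a + (b - a) = b by omega]

theorem pvWindow_full (s : List Char) (a : Nat) :
    (s.drop a).take (s.length - a) = s.drop a := by
  apply List.take_of_length_le
  simp

-- ---- specifications of A's inner scanning loops ----

theorem pvScanLineA_spec (s : List Char) (n j : Nat) :
    j ≤ pvScanLineA s n j ∧ pvScanLineA s n j ≤ max j n ∧
    (pvScanLineA s n j < n → s.getD (pvScanLineA s n j) ' ' = '\n') ∧
    (∀ k, j ≤ k → k < pvScanLineA s n j → s.getD k ' ' ≠ '\n') := by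
  fun_induction pvScanLineA with
  | case1 j h ih =>
    obtain ⟨h1, h2, h3, h4⟩ := ih
    refine ⟨by omega, by omega, h3, ?_⟩
    intro k hk1 hk2
    rcases Nat.eq_or_lt_of_le hk1 with rfl | hlt
    · exact h.2
    · exact h4 k hlt hk2
  | case2 j h =>
    rw [Decidable.not_and_iff_not_or_not] at h
    refine ⟨le_refl _, by omega, ?_, by omega⟩
    intro hlt
    rcases h with h | h
    · omega
    · simpa using h

theorem pvScanToParenA_spec (s : List Char) (n j : Nat) :
    j ≤ pvScanToParenA s n j ∧ pvScanToParenA s n j ≤ max j n ∧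
    (pvScanToParenA s n j < n → s.getD (pvScanToParenA s n j) ' ' = '(') ∧
    (∀ k, j ≤ k → k < pvScanToParenA s n j → s.getD k ' ' ≠ '(') := by
  fun_induction pvScanToParenA with
  | case1 j h ih =>
    obtain ⟨h1, h2, h3, h4⟩ := ih
    refine ⟨by omega, by omega, h3, ?_⟩
    intro k hk1 hk2
    rcases Nat.eq_or_lt_of_le hk1 with rfl | hlt
    · exact h.2
    · exact h4 k hlt hk2
  | case2 j h =>
    rw [Decidable.not_and_iff_not_or_not] at h
    refine ⟨le_refl _, by omega, ?_, by omega⟩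
    intro hlt
    rcases h with h | h
    · omega
    · simpa using h

theorem pvScanBlockA_spec (s : List Char) (n j : Nat) :
    j ≤ pvScanBlockA s n j ∧ pvScanBlockA s n j ≤ max j (n - 1) ∧
    (pvScanBlockA s n j < n - 1 →
      s.getD (pvScanBlockA s n j) ' ' = '*' ∧ s.getD (pvScanBlockA s n j + 1) ' ' = '/') ∧
    (∀ k, j ≤ k → k < pvScanBlockA s n j →
      ¬(s.getD k ' ' = '*' ∧ s.getD (k + 1) ' ' = '/')) := by
  fun_induction pvScanBlockA with
  | case1 j h ih =>
    obtain ⟨h1, h2, h3, h4⟩ := ih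
    refine ⟨by omega, by omega, h3, ?_⟩
    intro k hk1 hk2
    rcases Nat.eq_or_lt_of_le hk1 with rfl | hlt
    · exact h.2
    · exact h4 k hlt hk2
  | case2 j h =>
    rw [Decidable.not_and_iff_not_or_not] at h
    refine ⟨le_refl _, by omega, ?_, by omega⟩
    intro hlt
    rcases h with h | h
    · omega
    · simpa using h

theorem pvScanEndA_spec (s : List Char) (n : Nat) (endseq : List Char) (j : Nat) :
    j ≤ pvScanEndA s n endseq j ∧ pvScanEndA s n endseq j ≤ max j n ∧
    (pvScanEndA s n endseq j < n →
      (s.drop (pvScanEndA s n endseq j)).take endseq.length = endseq) ∧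
    (∀ k, j ≤ k → k < pvScanEndA s n endseq j → (s.drop k).take endseq.length ≠ endseq) := by
  fun_induction pvScanEndA with
  | case1 j h ih =>
    obtain ⟨h1, h2, h3, h4⟩ := ih
    refine ⟨by omega, by omega, h3, ?_⟩
    intro k hk1 hk2
    rcases Nat.eq_or_lt_of_le hk1 with rfl | hlt
    · exact h.2
    · exact h4 k hlt hk2
  | case2 j h =>
    rw [Decidable.not_and_iff_not_or_not] at h
    refine ⟨le_refl _, by omega, ?_, by omega⟩
    intro hlt
    rcases h with h | h
    · omega
    · simpa using h

theorem pvScanIdentA_spec (s : List Char) (n j : Nat) :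
    j ≤ pvScanIdentA s n j ∧ pvScanIdentA s n j ≤ max j n ∧
    (pvScanIdentA s n j < n →
      ¬(PySem.Chars.isalnum (s.getD (pvScanIdentA s n j) ' ') = true ∨
        s.getD (pvScanIdentA s n j) ' ' = '_')) := by
  fun_induction pvScanIdentA with
  | case1 j h ih =>
    obtain ⟨h1, h2, h3⟩ := ih
    exact ⟨by omega, by omega, h3⟩
  | case2 j h =>
    rw [Decidable.not_and_iff_not_or_not] at h
    refine ⟨le_refl _, by omega, ?_⟩
    intro hlt
    rcases h with h | h
    · omega
    · exact h

theorem pvBuildDelimA_eq (s : List Char) :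
    ∀ j acc, pvBuildDelimA s s.length j acc = acc ++ (s.drop j).take (pvScanToParenA s s.length j - j) := by
  intro j acc
  fun_induction pvBuildDelimA s s.length j acc with
  | case1 j acc h ih =>
    rw [ih]
    conv_rhs => rw [pvScanToParenA]
    rw [dif_pos h]
    have ht := (pvScanToParenA_spec s s.length (j + 1)).1
    rw [pvTakeCons s j _ h.1 ht, List.append_assoc]
    rfl
  | case2 j acc h =>
    rw [pvScanToParenA, dif_neg h]
    simp

theorem pvScanStrA_ge (s : List Char) (n : Nat) (q : Char) :
    ∀ j esc, j ≤ pvScanStrA s n q j esc := by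
  intro j esc
  fun_induction pvScanStrA s n q j esc <;> omega

theorem pvScanIdentA_ge (s : List Char) (n : Nat) : ∀ j, j ≤ pvScanIdentA s n j := by
  intro j
  fun_induction pvScanIdentA s n j <;> omega

theorem pvIdentPiece_eq (m : PySem.Dict (List Char) (List Char)) (ident : List Char) :
    (match m.get? ident with | some v => v | none => ident) = m.getD ident ident := by
  rw [PySem.Dict.getD_eq_get?_getD]
  cases m.get? ident <;> simp

-- ---- B-side: running the state machine over the chunks A's loops delimit ----

theorem pvRunB_cons (m : PySem.Dict (List Char) (List Char)) (c : Char) (cs : List Char) (st : PvSt) :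
    pvRunB m (c :: cs) st = (pvStepB m st c).2 ++ pvRunB m cs (pvStepB m st c).1 := rfl

theorem pvRunB_nil (m : PySem.Dict (List Char) (List Char)) (st : PvSt) :
    pvRunB m [] st = pvFinB m st := rfl

-- line comment body: state L behaves like N at '\n' (or at the end)
theorem pvRunB_line (s : List Char) (m : PySem.Dict (List Char) (List Char)) (k : Nat) :
    pvRunB m (s.drop k) PvSt.L =
      (s.drop k).take (pvScanLineA s s.length k - k) ++
        pvRunB m (s.drop (pvScanLineA s s.length k)) PvSt.N := by
  fun_induction pvScanLineA s s.length k with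
  | case1 j h ih =>
    have hge := (pvScanLineA_spec s s.length (j + 1)).1
    have hst : pvStepB m PvSt.L (s.getD j ' ') = (PvSt.L, [s.getD j ' ']) := by
      simp only [pvStepB]
      rw [if_neg h.2]
    rw [pvTakeCons s j (pvScanLineA s s.length (j + 1)) h.1 (by omega),
        pvDrop_cons (pvGetD_eq_some h.1), pvRunB_cons, hst]
    simp only []
    rw [ih]
    simp
  | case2 j h =>
    rw [Nat.sub_self, List.take_zero, List.nil_append]
    rw [Decidable.not_and_iff_not_or_not] at h
    rcases h with h | h
    · have hnil : s.drop j = [] := List.drop_eq_nil_of_le (by omega)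
      rw [hnil, pvRunB_nil, pvRunB_nil]
      rfl
    · simp only [not_not] at h
      have hj : j < s.length := by
        by_contra hn
        have h2 := List.getD_eq_default s ' ' (show s.length ≤ j by omega)
        rw [h] at h2
        exact absurd h2 (by decide)
      rw [pvDrop_cons (pvGetD_eq_some hj), pvRunB_cons, pvRunB_cons, h]
      have h1 : pvStepB m PvSt.L '\n' = (PvSt.N, ['\n']) := by
        simp [pvStepB]
      have h2 : pvStepB m PvSt.N '\n' = (PvSt.N, ['\n']) := by
        simp only [pvStepB, pvNormalB]
        rw [if_neg (by decide), if_neg (by decide), if_neg (by decide)]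
      rw [h1, h2]

-- string/char body: state Q mirrors A's escape-aware scan
theorem pvScanStrA_unfT (s : List Char) (n : Nat) (q : Char) (j : Nat) (h : j < n) :
    pvScanStrA s n q j true = pvScanStrA s n q (j + 1) false := by
  rw [pvScanStrA, dif_pos h]
  rfl

theorem pvScanStrA_unfF (s : List Char) (n : Nat) (q : Char) (j : Nat) (h : j < n) :
    pvScanStrA s n q j false =
      (if s.getD j ' ' = '\\' then pvScanStrA s n q (j + 1) true
       else if s.getD j ' ' = q then j + 1
       else pvScanStrA s n q (j + 1) false) := by
  rw [pvScanStrA, dif_pos h]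
  rfl

theorem pvScanStrA_stop (s : List Char) (n : Nat) (q : Char) (j : Nat) (esc : Bool)
    (h : ¬ j < n) : pvScanStrA s n q j esc = j := by
  rw [pvScanStrA, dif_neg h]

theorem pvRunB_q (s : List Char) (m : PySem.Dict (List Char) (List Char)) (q : Char)
    (hq : q = '"' ∨ q = '\'') :
    ∀ (f k : Nat) (esc : Bool), s.length - k ≤ f →
      pvRunB m (s.drop k) (PvSt.Q q esc) =
        (s.drop k).take (pvScanStrA s s.length q k esc - k) ++
          pvRunB m (s.drop (pvScanStrA s s.length q k esc)) PvSt.N := by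
  intro f
  induction f with
  | zero =>
    intro k esc hf
    rw [pvScanStrA_stop s s.length q k esc (by omega), Nat.sub_self, List.take_zero,
        List.nil_append]
    rw [List.drop_eq_nil_of_le (by omega : s.length ≤ k), pvRunB_nil, pvRunB_nil]
    rfl
  | succ f ih =>
    intro k esc hf
    by_cases hk : k < s.length
    · cases esc with
      | true =>
        rw [pvScanStrA_unfT s s.length q k hk]
        have hge := pvScanStrA_ge s s.length q (k + 1) false
        have hst : pvStepB m (PvSt.Q q true) (s.getD k ' ') = (PvSt.Q q false, [s.getD k ' ']) := by
          simp [pvStepB]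
        rw [pvTakeCons s k (pvScanStrA s s.length q (k + 1) false) hk (by omega),
            pvDrop_cons (pvGetD_eq_some hk), pvRunB_cons, hst]
        simp only []
        rw [ih (k + 1) false (by omega)]
        simp
      | false =>
        rw [pvScanStrA_unfF s s.length q k hk]
        by_cases hbs : s.getD k ' ' = '\\'
        · rw [if_pos hbs]
          have hge := pvScanStrA_ge s s.length q (k + 1) true
          have hst : pvStepB m (PvSt.Q q false) (s.getD k ' ') = (PvSt.Q q true, [s.getD k ' ']) := by
            simp only [pvStepB, Bool.false_eq_true, if_false]
            rw [if_pos hbs]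
          rw [pvTakeCons s k (pvScanStrA s s.length q (k + 1) true) hk (by omega),
              pvDrop_cons (pvGetD_eq_some hk), pvRunB_cons, hst]
          simp only []
          rw [ih (k + 1) true (by omega)]
          simp
        · rw [if_neg hbs]
          by_cases hcq : s.getD k ' ' = q
          · rw [if_pos hcq]
            have hst : pvStepB m (PvSt.Q q false) (s.getD k ' ') = (PvSt.N, [s.getD k ' ']) := by
              simp only [pvStepB, Bool.false_eq_true, if_false]
              rw [if_neg hbs, if_pos hcq]
            rw [pvTakeCons s k (k + 1) hk (by omega), Nat.sub_self, List.take_zero,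
                pvDrop_cons (pvGetD_eq_some hk), pvRunB_cons, hst]
          · rw [if_neg hcq]
            have hge := pvScanStrA_ge s s.length q (k + 1) false
            have hst : pvStepB m (PvSt.Q q false) (s.getD k ' ') = (PvSt.Q q false, [s.getD k ' ']) := by
              simp only [pvStepB, Bool.false_eq_true, if_false]
              rw [if_neg hbs, if_neg hcq]
            rw [pvTakeCons s k (pvScanStrA s s.length q (k + 1) false) hk (by omega),
                pvDrop_cons (pvGetD_eq_some hk), pvRunB_cons, hst]
            simp only []
            rw [ih (k + 1) false (by omega)]
            simp
    · rw [pvScanStrA_stop s s.length q k esc hk, Nat.sub_self, List.take_zero,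
          List.nil_append]
      rw [List.drop_eq_nil_of_le (by omega : s.length ≤ k), pvRunB_nil, pvRunB_nil]
      rfl

-- identifier run: state I accumulates exactly the characters A's scan consumes
theorem pvRunB_identRun (s : List Char) (m : PySem.Dict (List Char) (List Char)) (k : Nat) :
    ∀ buf, pvRunB m (s.drop k) (PvSt.I buf) =
      pvRunB m (s.drop (pvScanIdentA s s.length k))
        (PvSt.I (buf ++ (s.drop k).take (pvScanIdentA s s.length k - k))) := by
  fun_induction pvScanIdentA s s.length k with
  | case1 j h ih =>
    intro buf
    have hge := pvScanIdentA_ge s s.length (j + 1)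
    have hst : pvStepB m (PvSt.I buf) (s.getD j ' ') = (PvSt.I (buf ++ [s.getD j ' ']), []) := by
      simp only [pvStepB]
      rw [if_pos h.2]

    rw [pvTakeCons s j (pvScanIdentA s s.length (j + 1)) h.1 (by omega),
        pvDrop_cons (pvGetD_eq_some h.1), pvRunB_cons, hst]
    simp only [List.nil_append]
    rw [ih (buf ++ [s.getD j ' '])]
    simp
  | case2 j h =>
    intro buf
    rw [Nat.sub_self, List.take_zero, List.append_nil]

-- identifier exit: when the next character cannot start a raw/prefixed string,
-- the buffered identifier is flushed through the mapping and the machine behaves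
-- like N on the rest
theorem pvRunB_identExit (s : List Char) (m : PySem.Dict (List Char) (List Char))
    (j : Nat) (buf : List Char)
    (hstop : j < s.length →
      ¬(PySem.Chars.isalnum (s.getD j ' ') = true ∨ s.getD j ' ' = '_'))
    (hns : j < s.length → ¬(s.getD j ' ' = '"' ∧ pvSpecialB buf = true)) :
    pvRunB m (s.drop j) (PvSt.I buf) = m.getD buf buf ++ pvRunB m (s.drop j) PvSt.N := by
  by_cases hj : j < s.length
  · rw [pvDrop_cons (pvGetD_eq_some hj), pvRunB_cons, pvRunB_cons]
    have hst : pvStepB m (PvSt.I buf) (s.getD j ' ') =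
        ((pvNormalB (s.getD j ' ')).1, m.getD buf buf ++ (pvNormalB (s.getD j ' ')).2) := by
      simp only [pvStepB]
      rw [if_neg (hstop hj), if_neg (hns hj)]
    have hstN : pvStepB m PvSt.N (s.getD j ' ') = pvNormalB (s.getD j ' ') := rfl
    rw [hst, hstN]
    simp
  · have hnil : s.drop j = [] := List.drop_eq_nil_of_le (by omega)
    rw [hnil, pvRunB_nil, pvRunB_nil]
    simp [pvFinB]

-- pending '/': when no comment can follow, S is '/' followed by N
theorem pvRunB_slash (s : List Char) (m : PySem.Dict (List Char) (List Char)) (k : Nat)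
    (h : s.length ≤ k ∨ (s.getD k ' ' ≠ '/' ∧ s.getD k ' ' ≠ '*')) :
    pvRunB m (s.drop k) PvSt.S = '/' :: pvRunB m (s.drop k) PvSt.N := by
  by_cases hk : k < s.length
  · have hc : s.getD k ' ' ≠ '/' ∧ s.getD k ' ' ≠ '*' := by
      rcases h with h | h
      · omega
      · exact h
    rw [pvDrop_cons (pvGetD_eq_some hk), pvRunB_cons, pvRunB_cons]
    have hst : pvStepB m PvSt.S (s.getD k ' ') =
        ((pvNormalB (s.getD k ' ')).1, '/' :: (pvNormalB (s.getD k ' ')).2) := by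
      simp only [pvStepB]
      rw [if_neg hc.1, if_neg hc.2]
    have hstN : pvStepB m PvSt.N (s.getD k ' ') = pvNormalB (s.getD k ' ') := rfl
    rw [hst, hstN]
    simp
  · have hnil : s.drop k = [] := List.drop_eq_nil_of_le (by omega)
    rw [hnil, pvRunB_nil, pvRunB_nil]
    simp [pvFinB]

-- block comment: at the position where A's pair scan stops
theorem pvRunB_blockEnd (s : List Char) (m : PySem.Dict (List Char) (List Char)) (i2 : Nat)
    (st : PvSt) (hst : st = PvSt.B ∨ st = PvSt.BS) :
    pvRunB m (s.drop (pvScanBlockA s s.length i2)) st =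
      (s.drop (pvScanBlockA s s.length i2)).take
          (min s.length (pvScanBlockA s s.length i2 + 2) - pvScanBlockA s s.length i2) ++
        pvRunB m (s.drop (min s.length (pvScanBlockA s s.length i2 + 2))) PvSt.N := by
  obtain ⟨hge, hle, hhit, hmin⟩ := pvScanBlockA_spec s s.length i2
  set j0 := pvScanBlockA s s.length i2 with hj0
  by_cases hterm : j0 < s.length - 1
  · obtain ⟨hv1, hv2⟩ := hhit hterm
    have hmn : min s.length (j0 + 2) = j0 + 2 := by omega
    have hd1 : s.drop j0 = '*' :: s.drop (j0 + 1) := by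
      have h := pvDrop_cons (pvGetD_eq_some (show j0 < s.length by omega))
      rw [hv1] at h
      exact h
    have hd2 : s.drop (j0 + 1) = '/' :: s.drop (j0 + 2) := by
      have h := pvDrop_cons (pvGetD_eq_some (show j0 + 1 < s.length by omega))
      rw [hv2] at h
      exact h
    have hs1 : pvStepB m st '*' = (PvSt.BS, ['*']) := by
      rcases hst with rfl | rfl <;> simp [pvStepB]
    have hs2 : pvStepB m PvSt.BS '/' = (PvSt.N, ['/']) := by
      simp [pvStepB]
    have htk : j0 + 2 - j0 = 2 := by omega
    rw [hmn, htk, hd1, pvRunB_cons, hs1, hd2, pvRunB_cons, hs2]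
    simp
  · have hmn : min s.length (j0 + 2) = s.length := by omega
    rw [hmn, pvWindow_full, List.drop_length, pvRunB_nil]
    by_cases hn : j0 < s.length
    · have hone : s.drop j0 = [s.getD j0 ' '] := by
        have h1 := pvDrop_cons (pvGetD_eq_some hn)
        rw [List.drop_eq_nil_of_le (show s.length ≤ j0 + 1 by omega)] at h1
        exact h1
      rw [hone]
      rcases hst with rfl | rfl <;>
        · rw [pvRunB_cons]
          simp only [pvStepB]
          split_ifs <;> simp [pvRunB_nil, pvFinB]
    · rw [List.drop_eq_nil_of_le (by omega), pvRunB_nil]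
      rcases hst with rfl | rfl <;> simp [pvFinB]

-- block comment body: B/BS track "previous character was '*'"
theorem pvRunB_block (s : List Char) (m : PySem.Dict (List Char) (List Char)) (i2 : Nat) :
    ∀ f k st, pvScanBlockA s s.length i2 - k ≤ f → i2 ≤ k → k ≤ pvScanBlockA s s.length i2 →
      (st = PvSt.B ∨ (st = PvSt.BS ∧ i2 + 1 ≤ k ∧ s.getD (k - 1) ' ' = '*')) →
      pvRunB m (s.drop k) st =
        (s.drop k).take (min s.length (pvScanBlockA s s.length i2 + 2) - k) ++
          pvRunB m (s.drop (min s.length (pvScanBlockA s s.length i2 + 2))) PvSt.N := by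
  intro f
  induction f with
  | zero =>
    intro k st hf hk1 hk2 hstc
    have hk : k = pvScanBlockA s s.length i2 := by omega
    subst hk
    exact pvRunB_blockEnd s m i2 st (by rcases hstc with h | ⟨h, _, _⟩ <;> [exact Or.inl h; exact Or.inr h])
  | succ f ih =>
    intro k st hf hk1 hk2 hstc
    by_cases hkj : k < pvScanBlockA s s.length i2
    · have hle := (pvScanBlockA_spec s s.length i2).2.1
      have hkn : k < s.length := by omega
      have hpair := (pvScanBlockA_spec s s.length i2).2.2.2 k hk1 hkj
      have hstep : ∃ st2, pvStepB m st (s.getD k ' ') = (st2, [s.getD k ' ']) ∧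
          (st2 = PvSt.B ∨ (st2 = PvSt.BS ∧ i2 + 1 ≤ k + 1 ∧ s.getD (k + 1 - 1) ' ' = '*')) := by
        rcases hstc with rfl | ⟨rfl, hk3, hprev⟩
        · by_cases hc : s.getD k ' ' = '*'
          · exact ⟨PvSt.BS, by simp only [pvStepB]; rw [if_pos hc, hc],
              Or.inr ⟨rfl, by omega, by simpa using hc⟩⟩
          · exact ⟨PvSt.B, by simp only [pvStepB]; rw [if_neg hc], Or.inl rfl⟩
        · have hns : s.getD k ' ' ≠ '/' := by
            intro hc
            exact (pvScanBlockA_spec s s.length i2).2.2.2 (k - 1) (by omega) (by omega)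
              ⟨hprev, by rw [show k - 1 + 1 = k by omega]; exact hc⟩
          by_cases hc : s.getD k ' ' = '*'
          · exact ⟨PvSt.BS, by simp only [pvStepB]; rw [if_neg hns, if_pos hc, hc],
              Or.inr ⟨rfl, by omega, by simpa using hc⟩⟩
          · exact ⟨PvSt.B, by simp only [pvStepB]; rw [if_neg hns, if_neg hc], Or.inl rfl⟩
      obtain ⟨st2, hse, hst2⟩ := hstep
      have hj2ge : k + 1 ≤ min s.length (pvScanBlockA s s.length i2 + 2) := by omega
      rw [pvTakeCons s k (min s.length (pvScanBlockA s s.length i2 + 2)) hkn hj2ge,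
          pvDrop_cons (pvGetD_eq_some hkn), pvRunB_cons, hse]
      simp only []
      rw [ih (k + 1) st2 (by omega) (by omega) (by omega) hst2]
      simp
    · have hk : k = pvScanBlockA s s.length i2 := by omega
      subst hk
      exact pvRunB_blockEnd s m i2 st (by rcases hstc with h | ⟨h, _, _⟩ <;> [exact Or.inl h; exact Or.inr h])

-- raw-string delimiter: RD collects characters up to '(' and switches to RB
theorem pvRunB_rd (s : List Char) (m : PySem.Dict (List Char) (List Char)) (k : Nat) :
    ∀ acc, pvRunB m (s.drop k) (PvSt.RD acc) =
      (s.drop k).take (pvScanToParenA s s.length k - k) ++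
        (if pvScanToParenA s s.length k < s.length then
          '(' :: pvRunB m (s.drop (pvScanToParenA s s.length k + 1))
            (PvSt.RB (')' :: ((acc ++ (s.drop k).take (pvScanToParenA s s.length k - k)) ++ ['"'])) [])
         else []) := by
  fun_induction pvScanToParenA s s.length k with
  | case1 j h ih =>
    intro acc
    have hge := (pvScanToParenA_spec s s.length (j + 1)).1
    have hst : pvStepB m (PvSt.RD acc) (s.getD j ' ') =
        (PvSt.RD (acc ++ [s.getD j ' ']), [s.getD j ' ']) := by
      simp only [pvStepB]
      rw [if_neg h.2]
    rw [pvTakeCons s j (pvScanToParenA s s.length (j + 1)) h.1 (by omega),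
        pvDrop_cons (pvGetD_eq_some h.1), pvRunB_cons, hst]
    simp only []
    rw [ih (acc ++ [s.getD j ' '])]
    simp [List.append_assoc]
  | case2 j h =>
    intro acc
    rw [Nat.sub_self, List.take_zero, List.nil_append, List.append_nil]
    rw [Decidable.not_and_iff_not_or_not] at h
    rcases h with h | h
    · rw [if_neg (by omega), List.drop_eq_nil_of_le (by omega), pvRunB_nil]
      rfl
    · simp only [not_not] at h
      have hj : j < s.length := by
        by_contra hn
        have h2 := List.getD_eq_default s ' ' (show s.length ≤ j by omega)
        rw [h] at h2
        exact absurd h2 (by decide)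
      have hst : pvStepB m (PvSt.RD acc) '(' = (PvSt.RB (')' :: (acc ++ ['"'])) [], ['(']) := by
        simp [pvStepB]
      rw [if_pos hj, pvDrop_cons (pvGetD_eq_some hj), h, pvRunB_cons, hst]
      rfl

-- keep-last bookkeeping for the raw-string body
theorem pvKeepLast_snoc (l : List Char) (c : Char) (L : Nat) :
    pvKeepLast L (pvKeepLast L l ++ [c]) = pvKeepLast L (l ++ [c]) := by
  unfold pvKeepLast
  rw [show l.drop (l.length - L) ++ [c] = (l ++ [c]).drop (l.length - L) from
        (List.drop_append_of_le_length (by simp)).symm,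
      List.drop_drop]
  congr 1
  simp only [List.length_drop, List.length_append, List.length_cons, List.length_nil]
  omega

theorem pvKeepLast_window (s : List Char) (q p L : Nat) (hp : p ≤ s.length) (hge : q + L ≤ p) :
    pvKeepLast L ((s.drop q).take (p - q)) = (s.drop (p - L)).take L := by
  unfold pvKeepLast
  have hlen : ((s.drop q).take (p - q)).length = p - q := by
    simp
    omega
  rw [hlen, List.drop_take, List.drop_drop]
  have h1 : p - q - (p - q - L) = L := by omega
  have h2 : q + (p - q - L) = p - L := by omega
  rw [h1, h2]

-- A's end-sequence scan stops within bounds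
theorem pvScanEndA_len (s : List Char) (endseq : List Char) (q : Nat)
    (h : pvScanEndA s s.length endseq q < s.length) :
    pvScanEndA s s.length endseq q + endseq.length ≤ s.length := by
  have hhit := (pvScanEndA_spec s s.length endseq q).2.2.1 h
  have hlen := congrArg List.length hhit
  simp at hlen
  omega

-- raw-string body: the rolling last-|endseq| buffer finds the first occurrence of
-- the end sequence exactly where A's substring scan does
theorem pvRunB_rb (s : List Char) (m : PySem.Dict (List Char) (List Char))
    (endseq : List Char) (q : Nat) (hq : q ≤ s.length) (hL : 1 ≤ endseq.length) :
    ∀ f p, s.length - p ≤ f → q ≤ p → p ≤ s.length →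
      (∀ k, q ≤ k → k + endseq.length ≤ p → (s.drop k).take endseq.length ≠ endseq) →
      pvRunB m (s.drop p) (PvSt.RB endseq (pvKeepLast endseq.length ((s.drop q).take (p - q)))) =
        (s.drop p).take (min s.length (pvScanEndA s s.length endseq q + endseq.length) - p) ++
          (if pvScanEndA s s.length endseq q < s.length then
             pvRunB m (s.drop (pvScanEndA s s.length endseq q + endseq.length)) PvSt.N
           else []) := by
  obtain ⟨hg1, hg2, hhit, hmin⟩ := pvScanEndA_spec s s.length endseq q
  have hlenscan := pvScanEndA_len s endseq q
  intro f
  induction f with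
  | zero =>
    intro p hf hp1 hp2 hocc
    have hknn : ¬ pvScanEndA s s.length endseq q < s.length := by
      intro h
      exact hocc (pvScanEndA s s.length endseq q) hg1 (by have := hlenscan h; omega) (hhit h)
    have hdrop : s.drop p = [] := List.drop_eq_nil_of_le (by omega)
    rw [hdrop, pvRunB_nil, if_neg hknn]
    simp [pvFinB]
  | succ f ih =>
    intro p hf hp1 hp2 hocc
    by_cases hpn : p < s.length
    · have hwin : (s.drop q).take (p - q) ++ [s.getD p ' '] = (s.drop q).take (p + 1 - q) := by
        have h : p + 1 - q = (p - q) + 1 := by omega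
        rw [h, List.take_succ]
        congr 1
        rw [List.getElem?_drop]
        rw [show q + (p - q) = p by omega, pvGetD_eq_some hpn]
        rfl
      have hrec : pvKeepLast endseq.length
            (pvKeepLast endseq.length ((s.drop q).take (p - q)) ++ [s.getD p ' ']) =
          pvKeepLast endseq.length ((s.drop q).take (p + 1 - q)) := by
        rw [pvKeepLast_snoc, hwin]
      by_cases hmatch : pvKeepLast endseq.length ((s.drop q).take (p + 1 - q)) = endseq
      · have hlen : endseq.length ≤ p + 1 - q := by
          have h := congrArg List.length hmatch
          simp only [pvKeepLast, List.length_drop, List.length_take] at h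
          omega
        have hocc1 : (s.drop (p + 1 - endseq.length)).take endseq.length = endseq := by
          rw [← pvKeepLast_window s q (p + 1) endseq.length (by omega) (by omega)]
          exact hmatch
        have hk0eq : pvScanEndA s s.length endseq q = p + 1 - endseq.length := by
          by_contra hne
          rcases Nat.lt_or_ge (pvScanEndA s s.length endseq q) (p + 1 - endseq.length) with hlt | hge
          · exact hocc (pvScanEndA s s.length endseq q) hg1 (by omega) (hhit (by omega))
          · exact hmin (p + 1 - endseq.length) (by omega) (by omega) hocc1
        have hk0lt : pvScanEndA s s.length endseq q < s.length := by omega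
        have hmn : min s.length (pvScanEndA s s.length endseq q + endseq.length) = p + 1 := by
          omega
        have hst : pvStepB m
              (PvSt.RB endseq (pvKeepLast endseq.length ((s.drop q).take (p - q))))
              (s.getD p ' ') = (PvSt.N, [s.getD p ' ']) := by
          simp only [pvStepB]
          rw [hrec, if_pos hmatch]
        rw [hmn, pvTakeCons s p (p + 1) hpn (by omega), Nat.sub_self, List.take_zero,
            pvDrop_cons (pvGetD_eq_some hpn), pvRunB_cons, hst, if_pos hk0lt,
            show pvScanEndA s s.length endseq q + endseq.length = p + 1 by omega]
      · have hocc' : ∀ k, q ≤ k → k + endseq.length ≤ p + 1 →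
            (s.drop k).take endseq.length ≠ endseq := by
          intro k hk1 hk2 heq
          rcases Nat.lt_or_ge (k + endseq.length) (p + 1) with hlt | hge
          · exact hocc k hk1 (by omega) heq
          · have hkeq : k = p + 1 - endseq.length := by omega
            apply hmatch
            rw [pvKeepLast_window s q (p + 1) endseq.length (by omega) (by omega), ← hkeq]
            exact heq
        have hge2 : p + 1 ≤ min s.length (pvScanEndA s s.length endseq q + endseq.length) := by
          rcases Nat.lt_or_ge (pvScanEndA s s.length endseq q) s.length with hlt | hge
          · have h1 := hlenscan hlt
            have h2 : ¬ (pvScanEndA s s.length endseq q + endseq.length ≤ p) :=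
              fun hcon => hocc (pvScanEndA s s.length endseq q) hg1 hcon (hhit hlt)
            omega
          · omega
        have hst : pvStepB m
              (PvSt.RB endseq (pvKeepLast endseq.length ((s.drop q).take (p - q))))
              (s.getD p ' ') =
            (PvSt.RB endseq (pvKeepLast endseq.length ((s.drop q).take (p + 1 - q))),
              [s.getD p ' ']) := by
          simp only [pvStepB]
          rw [hrec, if_neg hmatch]
        rw [pvTakeCons s p (min s.length (pvScanEndA s s.length endseq q + endseq.length)) hpn hge2,
            pvDrop_cons (pvGetD_eq_some hpn), pvRunB_cons, hst]
        simp only []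
        rw [ih (p + 1) (by omega) (by omega) (by omega) hocc']
        simp
    · have hknn : ¬ pvScanEndA s s.length endseq q < s.length := by
        intro h
        exact hocc (pvScanEndA s s.length endseq q) hg1 (by have := hlenscan h; omega) (hhit h)
      have hdrop : s.drop p = [] := List.drop_eq_nil_of_le (by omega)
      rw [hdrop, pvRunB_nil, if_neg hknn]
      simp [pvFinB]

-- ---- evaluating single machine steps ----

theorem pvStepB_N (m : PySem.Dict (List Char) (List Char)) (c : Char) :
    pvStepB m PvSt.N c = pvNormalB c := rfl

theorem pvStepI_cont (m : PySem.Dict (List Char) (List Char)) (buf : List Char) (c : Char)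
    (h : PySem.Chars.isalnum c = true ∨ c = '_') :
    pvStepB m (PvSt.I buf) c = (PvSt.I (buf ++ [c]), []) := by
  simp only [pvStepB]
  rw [if_pos h]

theorem pvStepI_quote (m : PySem.Dict (List Char) (List Char)) (buf : List Char)
    (hb : pvSpecialB buf = true) :
    pvStepB m (PvSt.I buf) '"' =
      (if buf = ['R'] then (PvSt.RD [], buf ++ ['"']) else (PvSt.Q '"' false, buf ++ ['"'])) := by
  simp only [pvStepB]
  rw [if_neg (by decide), if_pos (by exact ⟨by trivial, hb⟩)]

theorem pvSpecialB_eq (buf : List Char) (h : pvSpecialB buf = true) :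
    buf = ['R'] ∨ buf = ['u', '8', 'R'] ∨ buf = ['u', 'R'] ∨ buf = ['U', 'R'] ∨ buf = ['L', 'R'] := by
  unfold pvSpecialB at h
  simp only [Bool.or_eq_true, decide_eq_true_eq] at h
  tauto

theorem pvAlpha_ne (c : Char) (hc : PySem.Chars.isalpha c = true ∨ c = '_') :
    c ≠ '/' ∧ c ≠ '"' ∧ c ≠ '\'' := by
  rcases hc with h | rfl
  · refine ⟨?_, ?_, ?_⟩ <;> rintro rfl <;> exact absurd h (by decide)
  · exact ⟨by decide, by decide, by decide⟩

-- ---- the main correspondence ----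

theorem pvLoop_runB (s : List Char) (m : PySem.Dict (List Char) (List Char)) :
    ∀ (fuel i : Nat) (out : List (List Char)), s.length - i < fuel →
      (pvLoopA s m s.length fuel i out).flatten = out.flatten ++ pvRunB m (s.drop i) PvSt.N := by
  intro fuel
  induction fuel with
  | zero => intro i out h; omega
  | succ fuel ih =>
    intro i out hfu
    by_cases hi : i < s.length
    · by_cases hline : s.getD i ' ' = '/' ∧ pvPeekA s s.length i 1 = some '/'
      · -- line comment
        obtain ⟨hp1, hp2⟩ := (pvPeek_some_iff s s.length i 1 '/').mp hline.2
        have hge := (pvScanLineA_spec s s.length (i + 2)).1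
        have hd0 : s.drop i = '/' :: s.drop (i + 1) := by
          have h := pvDrop_cons (pvGetD_eq_some hi); rw [hline.1] at h; exact h
        have hd1 : s.drop (i + 1) = '/' :: s.drop (i + 2) := by
          have h := pvDrop_cons (pvGetD_eq_some hp1); rw [hp2] at h; exact h
        have key : pvRunB m (s.drop i) PvSt.N =
            (s.drop i).take (pvScanLineA s s.length (i + 2) - i) ++
              pvRunB m (s.drop (pvScanLineA s s.length (i + 2))) PvSt.N := by
          rw [pvTakeCons s i (pvScanLineA s s.length (i + 2)) hi (by omega),
              pvTakeCons s (i + 1) (pvScanLineA s s.length (i + 2)) hp1 (by omega),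
              hline.1, hp2, hd0, pvRunB_cons, pvStepB_N,
              show pvNormalB '/' = (PvSt.S, []) from by decide]
          simp only [List.nil_append]
          rw [hd1, pvRunB_cons, show pvStepB m PvSt.S '/' = (PvSt.L, ['/', '/']) from by simp [pvStepB]]
          simp only []
          rw [pvRunB_line s m (i + 2)]
          simp
        simp only [pvLoopA, if_pos hi, if_pos hline]
        rw [ih _ _ (by omega), key]
        simp [List.append_assoc]
      · by_cases hblock : s.getD i ' ' = '/' ∧ pvPeekA s s.length i 1 = some '*'
        · -- block comment
          obtain ⟨hp1, hp2⟩ := (pvPeek_some_iff s s.length i 1 '*').mp hblock.2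
          have hge := (pvScanBlockA_spec s s.length (i + 2)).1
          have hd0 : s.drop i = '/' :: s.drop (i + 1) := by
            have h := pvDrop_cons (pvGetD_eq_some hi); rw [hblock.1] at h; exact h
          have hd1 : s.drop (i + 1) = '*' :: s.drop (i + 2) := by
            have h := pvDrop_cons (pvGetD_eq_some hp1); rw [hp2] at h; exact h
          have hbrun := pvRunB_block s m (i + 2) (pvScanBlockA s s.length (i + 2) - (i + 2))
            (i + 2) PvSt.B (le_refl _) (le_refl _) (pvScanBlockA_spec s s.length (i + 2)).1
            (Or.inl rfl)
          have key : pvRunB m (s.drop i) PvSt.N =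
              (s.drop i).take (min s.length (pvScanBlockA s s.length (i + 2) + 2) - i) ++
                pvRunB m (s.drop (min s.length (pvScanBlockA s s.length (i + 2) + 2))) PvSt.N := by
            rw [pvTakeCons s i (min s.length (pvScanBlockA s s.length (i + 2) + 2)) hi (by omega),
                pvTakeCons s (i + 1) (min s.length (pvScanBlockA s s.length (i + 2) + 2)) hp1 (by omega),
                hblock.1, hp2, hd0, pvRunB_cons, pvStepB_N,
                show pvNormalB '/' = (PvSt.S, []) from by decide]
            simp only [List.nil_append]
            rw [hd1, pvRunB_cons, show pvStepB m PvSt.S '*' = (PvSt.B, ['/', '*']) from by simp [pvStepB]]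
            simp only []
            rw [hbrun]
            simp
          simp only [pvLoopA, if_pos hi, hline, if_false, if_pos hblock]
          rw [ih _ _ (by omega), key]
          simp [List.append_assoc]
        · by_cases h8B : (s.drop i).take 3 = ['u', '8', 'R'] ∧ i + 3 < s.length ∧
              s.getD (i + 3) ' ' = '"'
          · -- u8R" prefix then an ordinary string
            obtain ⟨h3, h4, hq3⟩ := h8B
            obtain ⟨g0, g1, g2⟩ := (pvDropTake3 s i 'u' '8' 'R').mp h3
            have hcu : s.getD i ' ' = 'u' := (pvGetD_of_some g0).2
            have houter : (s.getD i ' ' = 'u' ∨ s.getD i ' ' = 'U' ∨ s.getD i ' ' = 'L') ∧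
                i + 1 < s.length := ⟨Or.inl hcu, by omega⟩
            have hq3' : s[i + 3]? = some '"' := by rw [pvGetD_eq_some (by omega), hq3]
            have hcons : s.drop (i + 3) = '"' :: s.drop (i + 4) := pvDrop_cons hq3'
            have hsge := pvScanStrA_ge s s.length '"' (i + 4) false
            have key : pvRunB m (s.drop i) PvSt.N =
                (['u', '8', 'R', '"'] ++
                  (s.drop (i + 4)).take (pvScanStrA s s.length '"' (i + 4) false - (i + 4))) ++
                  pvRunB m (s.drop (pvScanStrA s s.length '"' (i + 4) false)) PvSt.N := by
              rw [pvDrop_cons g0, pvRunB_cons, pvStepB_N,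
                  show pvNormalB 'u' = (PvSt.I ['u'], []) from by decide]
              simp only [List.nil_append]
              rw [pvDrop_cons g1, pvRunB_cons, pvStepI_cont m ['u'] '8' (by decide)]
              simp only [List.nil_append, List.cons_append, List.nil_append]
              rw [pvDrop_cons g2, pvRunB_cons, pvStepI_cont m ['u', '8'] 'R' (by decide)]
              simp only [List.nil_append, List.cons_append, List.nil_append]
              rw [hcons, pvRunB_cons, pvStepI_quote m ['u', '8', 'R'] (by decide),
                  if_neg (by decide : ¬ (['u', '8', 'R'] : List Char) = ['R'])]
              simp only []
              rw [pvRunB_q s m '"' (Or.inl rfl) s.length (i + 4) false (by omega)]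
              simp [List.append_assoc]
            simp only [pvLoopA, if_pos hi, hline, hblock, if_false, if_pos houter,
              if_pos (⟨h3, h4, hq3⟩ : (s.drop i).take 3 = ['u', '8', 'R'] ∧
                i + 3 < s.length ∧ s.getD (i + 3) ' ' = '"')]
            rw [if_neg (by rw [hcons]; simp),
                if_pos (Or.inl hq3 : s.getD (i + 3) ' ' = '"' ∨ s.getD (i + 3) ' ' = '\''),
                show pvScanStrA s s.length (s.getD (i + 3) ' ') (i + 3 + 1) false =
                  pvScanStrA s s.length '"' (i + 4) false from by rw [hq3]]
            rw [ih _ _ (by omega), key]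
            have htk : (s.drop (i + 3)).take (pvScanStrA s s.length '"' (i + 4) false - (i + 3)) =
                '"' :: (s.drop (i + 4)).take (pvScanStrA s s.length '"' (i + 4) false - (i + 4)) := by
              rw [pvTakeCons s (i + 3) (pvScanStrA s s.length '"' (i + 4) false) (by omega) (by omega), hq3]
            rw [htk, h3]
            simp [List.append_assoc]
          · by_cases h2B : ((s.drop i).take 2 = ['u', 'R'] ∨ (s.drop i).take 2 = ['U', 'R'] ∨
                (s.drop i).take 2 = ['L', 'R']) ∧ i + 2 < s.length ∧ s.getD (i + 2) ' ' = '"'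
            · -- uR"/UR"/LR" prefix then an ordinary string
              obtain ⟨h2t, h4, hq2⟩ := h2B
              obtain ⟨c0, hc0, h2l⟩ : ∃ c0, (c0 = 'u' ∨ c0 = 'U' ∨ c0 = 'L') ∧
                  (s.drop i).take 2 = [c0, 'R'] := by
                rcases h2t with h | h | h
                · exact ⟨'u', Or.inl rfl, h⟩
                · exact ⟨'U', Or.inr (Or.inl rfl), h⟩
                · exact ⟨'L', Or.inr (Or.inr rfl), h⟩
              obtain ⟨g0, g1⟩ := (pvDropTake2 s i c0 'R').mp h2l
              have hq2' : s[i + 2]? = some '"' := by rw [pvGetD_eq_some (by omega), hq2]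
              have hcons : s.drop (i + 2) = '"' :: s.drop (i + 3) := pvDrop_cons hq2'
              have hsge := pvScanStrA_ge s s.length '"' (i + 3) false
              have hcu : s.getD i ' ' = 'u' ∨ s.getD i ' ' = 'U' ∨ s.getD i ' ' = 'L' := by
                have h := (pvGetD_of_some g0).2
                rcases hc0 with rfl | rfl | rfl
                · exact Or.inl h
                · exact Or.inr (Or.inl h)
                · exact Or.inr (Or.inr h)
              have houter : (s.getD i ' ' = 'u' ∨ s.getD i ' ' = 'U' ∨ s.getD i ' ' = 'L') ∧
                  i + 1 < s.length := ⟨hcu, by omega⟩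
              have key : pvRunB m (s.drop i) PvSt.N =
                  ([c0, 'R', '"'] ++
                    (s.drop (i + 3)).take (pvScanStrA s s.length '"' (i + 3) false - (i + 3))) ++
                    pvRunB m (s.drop (pvScanStrA s s.length '"' (i + 3) false)) PvSt.N := by
                have hnb : pvNormalB c0 = (PvSt.I [c0], []) := by
                  rcases hc0 with rfl | rfl | rfl <;> decide
                rw [pvDrop_cons g0, pvRunB_cons, pvStepB_N, hnb]
                simp only [List.nil_append]
                rw [pvDrop_cons g1, pvRunB_cons, pvStepI_cont m [c0] 'R' (by decide)]
                simp only [List.nil_append, List.cons_append, List.nil_append]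
                have hsp : pvSpecialB [c0, 'R'] = true := by
                  rcases hc0 with rfl | rfl | rfl <;> decide
                rw [hcons, pvRunB_cons, pvStepI_quote m [c0, 'R'] hsp,
                    if_neg (by rcases hc0 with rfl | rfl | rfl <;> decide)]
                simp only []
                rw [pvRunB_q s m '"' (Or.inl rfl) s.length (i + 3) false (by omega)]
                simp [List.append_assoc]
              simp only [pvLoopA, if_pos hi, hline, hblock, h8B, if_false, if_pos houter,
                if_pos (⟨h2t, h4, hq2⟩ : ((s.drop i).take 2 = ['u', 'R'] ∨
                  (s.drop i).take 2 = ['U', 'R'] ∨ (s.drop i).take 2 = ['L', 'R']) ∧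
                  i + 2 < s.length ∧ s.getD (i + 2) ' ' = '"')]
              rw [if_neg (by rw [hcons]; simp),
                  if_pos (Or.inl hq2 : s.getD (i + 2) ' ' = '"' ∨ s.getD (i + 2) ' ' = '\''),
                  show pvScanStrA s s.length (s.getD (i + 2) ' ') (i + 2 + 1) false =
                    pvScanStrA s s.length '"' (i + 3) false from by rw [hq2]]
              rw [ih _ _ (by omega), key]
              have htk : (s.drop (i + 2)).take (pvScanStrA s s.length '"' (i + 3) false - (i + 2)) =
                  '"' :: (s.drop (i + 3)).take (pvScanStrA s s.length '"' (i + 3) false - (i + 3)) := by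
                rw [pvTakeCons s (i + 2) (pvScanStrA s s.length '"' (i + 3) false) (by omega) (by omega), hq2]
              rw [htk, h2l]
              simp [List.append_assoc]
            · by_cases hraw : (s.drop i).take 2 = ['R', '"']
              · -- raw string
                obtain ⟨g0, g1⟩ := (pvDropTake2 s i 'R' '"').mp hraw
                have hi1 : i + 1 < s.length := (pvGetD_of_some g1).1
                have hd1 : s.drop (i + 1) = '"' :: s.drop (i + 2) := pvDrop_cons g1
                have hpsp := pvScanToParenA_spec s s.length (i + 2)
                have key0 : pvRunB m (s.drop i) PvSt.N =
                    ['R', '"'] ++ pvRunB m (s.drop (i + 2)) (PvSt.RD []) := by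
                  rw [pvDrop_cons g0, pvRunB_cons, pvStepB_N,
                      show pvNormalB 'R' = (PvSt.I ['R'], []) from by decide]
                  simp only [List.nil_append]
                  rw [hd1, pvRunB_cons, pvStepI_quote m ['R'] (by decide),
                      if_pos (rfl : (['R'] : List Char) = ['R'])]
                  simp
                rw [key0]
                have hrd := pvRunB_rd s m (i + 2) []
                simp only [List.nil_append] at hrd
                simp only [pvLoopA, if_pos hi, hline, hblock, h8B, h2B, if_false, ite_self,
                  if_pos hraw]
                by_cases hnf : pvScanToParenA s s.length (i + 2) ≥ s.length
                · have hi2 : pvScanToParenA s s.length (i + 2) = s.length := by omega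
                  rw [if_pos hnf, ih _ _ (by omega), hrd, hi2, pvWindow_full,
                      if_neg (by omega), List.drop_length, pvRunB_nil,
                      pvDrop_cons g0, pvDrop_cons g1]
                  simp [pvFinB]
                · rw [if_neg hnf]
                  have hi2n : pvScanToParenA s s.length (i + 2) < s.length := by omega
                  have hparen : s.getD (pvScanToParenA s s.length (i + 2)) ' ' = '(' :=
                    hpsp.2.2.1 hi2n
                  have hdel := pvBuildDelimA_eq s (i + 2) []
                  simp only [List.nil_append] at hdel
                  rw [hdel]
                  set i2 := pvScanToParenA s s.length (i + 2) with hi2def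
                  clear_value i2
                  set es := ')' :: ((s.drop (i + 2)).take (i2 - (i + 2)) ++ ['"']) with hes
                  have hesl : 1 ≤ es.length := by simp [hes]
                  have hrb := pvRunB_rb s m es (i2 + 1) (by omega) hesl
                    (s.length - (i2 + 1)) (i2 + 1) (le_refl _) (le_refl _) (by omega)
                    (by intro k h1 h2 _; omega)
                  rw [Nat.sub_self, List.take_zero] at hrb
                  have hkl0 : pvKeepLast es.length ([] : List Char) = [] := by
                    simp [pvKeepLast]
                  rw [hkl0] at hrb
                  have hscan := pvScanEndA_spec s s.length es (i2 + 1)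
                  by_cases hk : pvScanEndA s s.length es (i2 + 1) < s.length
                  · have hkL := pvScanEndA_len s es (i2 + 1) hk
                    have hmn : min s.length (pvScanEndA s s.length es (i2 + 1) + es.length) =
                        pvScanEndA s s.length es (i2 + 1) + es.length := by omega
                    rw [if_pos hk, ih _ _ (by omega), hrd, if_pos hi2n, hrb, if_pos hk, hmn]
                    -- assemble the windows
                    have hw : (s.drop i).take (pvScanEndA s s.length es (i2 + 1) + es.length - i) =
                        'R' :: '"' :: ((s.drop (i + 2)).take (i2 - (i + 2)) ++
                          '(' :: (s.drop (i2 + 1)).take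
                            (pvScanEndA s s.length es (i2 + 1) + es.length - (i2 + 1))) := by
                      rw [pvTakeCons s i _ hi (by omega), pvTakeCons s (i + 1) _ hi1 (by omega),
                          (pvGetD_of_some g0).2, (pvGetD_of_some g1).2,
                          ← pvWindow_append s (i + 2) i2
                            (pvScanEndA s s.length es (i2 + 1) + es.length) (by omega) (by omega),
                          pvTakeCons s i2 _ hi2n (by omega), hparen]
                    rw [hw]
                    simp [List.append_assoc]
                  · have hkeq : pvScanEndA s s.length es (i2 + 1) = s.length := by
                      have := hscan.2.1
                      omega
                    rw [if_neg hk, ih _ _ (by omega), hrd, if_pos hi2n, hrb, if_neg hk, hkeq]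
                    have hmn : min s.length (s.length + es.length) = s.length := by omega
                    rw [hmn, pvWindow_full, List.drop_length, pvRunB_nil]
                    have hsplit : s.drop i = 'R' :: '"' ::
                        ((s.drop (i + 2)).take (i2 - (i + 2)) ++ '(' :: s.drop (i2 + 1)) := by
                      conv_lhs => rw [pvDrop_cons g0, pvDrop_cons g1,
                        pvSplitDrop s (i + 2) i2 (by omega),
                        pvDrop_cons (by rw [pvGetD_eq_some hi2n, hparen] :
                          s[i2]? = some '(')]
                    rw [hsplit]
                    simp [pvFinB, List.append_assoc]
              · -- ordinary string, identifier, or single character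
                simp only [pvLoopA, if_pos hi, hline, hblock, h8B, h2B, if_false, ite_self,
                  hraw]
                by_cases hstr : s.getD i ' ' = '"' ∨ s.getD i ' ' = '\''
                · have hsge := pvScanStrA_ge s s.length (s.getD i ' ') (i + 1) false
                  have key : pvRunB m (s.drop i) PvSt.N =
                      (s.drop i).take (pvScanStrA s s.length (s.getD i ' ') (i + 1) false - i) ++
                        pvRunB m (s.drop (pvScanStrA s s.length (s.getD i ' ') (i + 1) false)) PvSt.N := by
                    have hnb : pvNormalB (s.getD i ' ') = (PvSt.Q (s.getD i ' ') false, [s.getD i ' ']) := by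
                      rcases hstr with h | h <;> rw [h] <;> decide
                    rw [pvTakeCons s i (pvScanStrA s s.length (s.getD i ' ') (i + 1) false) hi (by omega),
                        pvDrop_cons (pvGetD_eq_some hi), pvRunB_cons, pvStepB_N, hnb]
                    simp only []
                    rw [pvRunB_q s m (s.getD i ' ') hstr s.length (i + 1) false (by omega)]
                    simp
                  rw [if_pos hstr, ih _ _ (by omega), key]
                  simp [List.append_assoc]
                · rw [if_neg hstr]
                  by_cases hid : PySem.Chars.isalpha (s.getD i ' ') = true ∨ s.getD i ' ' = '_'
                  · -- identifier
                    obtain ⟨hne1, hne2, hne3⟩ := pvAlpha_ne (s.getD i ' ') hid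
                    have hige := pvScanIdentA_ge s s.length (i + 1)
                    have hile : pvScanIdentA s s.length (i + 1) ≤ s.length := by
                      have := (pvScanIdentA_spec s s.length (i + 1)).2.1
                      omega
                    set j := pvScanIdentA s s.length (i + 1) with hjdef
                    clear_value j
                    have hident : [s.getD i ' '] ++ (s.drop (i + 1)).take (j - (i + 1)) =
                        (s.drop i).take (j - i) := by
                      rw [pvTakeCons s i j hi (by omega)]
                      rfl
                    have hlenid : ((s.drop i).take (j - i)).length = j - i := by
                      simp
                      omega
                    have hstop := (pvScanIdentA_spec s s.length (i + 1)).2.2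
                    rw [← hjdef] at hstop
                    have hns : j < s.length →
                        ¬(s.getD j ' ' = '"' ∧ pvSpecialB ((s.drop i).take (j - i)) = true) := by
                      intro hj hand
                      obtain ⟨hdq, hsp⟩ := hand
                      have hjq : s[j]? = some '"' := by rw [pvGetD_eq_some hj, hdq]
                      have hsp' := pvSpecialB_eq _ hsp
                      rcases hsp' with h1 | h1 | h1 | h1 | h1
                      · have hji : j = i + 1 := by rw [h1] at hlenid; simp at hlenid; omega
                        apply hraw
                        rw [pvDropTake2]
                        refine ⟨?_, by rw [show i + 1 = j from by omega]; exact hjq⟩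
                        have h2 := (pvTakeOne_iff (s.drop i) 'R').mp
                          (by rw [show (1 : Nat) = j - i from by omega]; exact h1)
                        rwa [List.getElem?_drop, Nat.add_zero] at h2
                      · have hji : j = i + 3 := by rw [h1] at hlenid; simp at hlenid; omega
                        exact h8B ⟨by rw [show (3 : Nat) = j - i from by omega]; exact h1,
                          by omega, by rw [show i + 3 = j from by omega]; exact hdq⟩
                      · have hji : j = i + 2 := by rw [h1] at hlenid; simp at hlenid; omega
                        exact h2B ⟨Or.inl (by rw [show (2 : Nat) = j - i from by omega]; exact h1),
                          by omega, by rw [show i + 2 = j from by omega]; exact hdq⟩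
                      · have hji : j = i + 2 := by rw [h1] at hlenid; simp at hlenid; omega
                        exact h2B ⟨Or.inr (Or.inl (by rw [show (2 : Nat) = j - i from by omega]; exact h1)),
                          by omega, by rw [show i + 2 = j from by omega]; exact hdq⟩
                      · have hji : j = i + 2 := by rw [h1] at hlenid; simp at hlenid; omega
                        exact h2B ⟨Or.inr (Or.inr (by rw [show (2 : Nat) = j - i from by omega]; exact h1)),
                          by omega, by rw [show i + 2 = j from by omega]; exact hdq⟩
                    have key : pvRunB m (s.drop i) PvSt.N =
                        m.getD ((s.drop i).take (j - i)) ((s.drop i).take (j - i)) ++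
                          pvRunB m (s.drop j) PvSt.N := by
                      have hnb : pvNormalB (s.getD i ' ') = (PvSt.I [s.getD i ' '], []) := by
                        unfold pvNormalB
                        rw [if_neg hne1, if_neg (by rintro (h | h) <;> [exact hne2 h; exact hne3 h]),
                            if_pos hid]
                      rw [pvDrop_cons (pvGetD_eq_some hi), pvRunB_cons, pvStepB_N, hnb]
                      simp only [List.nil_append]
                      rw [pvRunB_identRun s m (i + 1) [s.getD i ' '], ← hjdef, hident,
                          pvRunB_identExit s m j ((s.drop i).take (j - i)) hstop hns,
                          ← pvDrop_cons (pvGetD_eq_some hi)]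
                    have hcons0 : s.getD i ' ' :: s.drop (i + 1) = s.drop i :=
                      (pvDrop_cons (pvGetD_eq_some hi)).symm
                    rw [if_pos hid, ih _ _ (by omega), key, pvIdentPiece_eq]
                    simp [List.append_assoc, hcons0]
                  · -- single character (possibly a lone '/')
                    rw [if_neg hid]
                    by_cases hsl : s.getD i ' ' = '/'
                    · have hcond : s.length ≤ i + 1 ∨
                          (s.getD (i + 1) ' ' ≠ '/' ∧ s.getD (i + 1) ' ' ≠ '*') := by
                        by_cases hn1 : i + 1 < s.length
                        · right
                          constructor
                          · intro hc
                            exact hline ⟨hsl, (pvPeek_some_iff s s.length i 1 '/').mpr ⟨by omega, hc⟩⟩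
                          · intro hc
                            exact hblock ⟨hsl, (pvPeek_some_iff s s.length i 1 '*').mpr ⟨by omega, hc⟩⟩
                        · left; omega
                      have key : pvRunB m (s.drop i) PvSt.N =
                          [s.getD i ' '] ++ pvRunB m (s.drop (i + 1)) PvSt.N := by
                        rw [pvDrop_cons (pvGetD_eq_some hi), pvRunB_cons, pvStepB_N, hsl,
                            show pvNormalB '/' = (PvSt.S, []) from by decide]
                        simp only [List.nil_append]
                        rw [pvRunB_slash s m (i + 1) hcond]
                        rfl
                      rw [ih _ _ (by omega), key]
                      simp [List.append_assoc]
                    · have key : pvRunB m (s.drop i) PvSt.N =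
                          [s.getD i ' '] ++ pvRunB m (s.drop (i + 1)) PvSt.N := by
                        rw [pvDrop_cons (pvGetD_eq_some hi), pvRunB_cons, pvStepB_N]
                        have hnb : pvNormalB (s.getD i ' ') = (PvSt.N, [s.getD i ' ']) := by
                          unfold pvNormalB
                          rw [if_neg hsl, if_neg hstr, if_neg hid]
                        rw [hnb]
                      rw [ih _ _ (by omega), key]
                      simp [List.append_assoc]
    · simp only [pvLoopA, if_neg hi]
      rw [List.drop_eq_nil_of_le (by omega), pvRunB_nil]
      simp [pvFinB]

-- ===== VERDICT (by name: the statement is the Claim_ definition above) =====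
theorem replace_identifiers_spec : Claim_equal_replace_identifiers := by
  intro code mapping _
  unfold Spec_replace_identifiers replace_identifiers replace_identifiers_alt
  by_cases hm : mapping = []
  · simp [hm]
  · simp only [hm, if_false]
    have := pvLoop_runB code.toList
      (PySem.Dict.mk (mapping.map (fun p => (p.1.toList, p.2.toList))))
      (code.toList.length + 1) 0 [] (by omega)
    rw [this]
    rfl
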